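-- pv_equiv track=rewrite | github.com/icecloud-dcp/wordcloud_app | wordcloud_app.py | build_cli_cloud
-- ===== SOURCE A (Python) =====
-- from collections import Counter
--
-- def build_cli_cloud(text):
--     words = [word.strip() for word in text.split() if word.strip()]
--     if not words:
--         return []
--
--     counts = Counter(words)
--     max_count = max(counts.values())
--     lines = [
--         f"{word}: " + ("#" * max(1, counts[word] * 10 // max_count))
--         for word, _ in counts.most_common()
--     ]
--     return lines
-- ===== SOURCE B (Python) =====
-- def build_cli_cloud(text):
--     words = text.split()
--     if not words:
--         return []
--
--     distinct = list(dict.fromkeys(words))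
--     pairs = [(w, words.count(w)) for w in distinct]
--     max_count = max(k for _, k in pairs)
--
--     def emit(c):
--         if c == 0:
--             return []
--         bar = "#" * max(1, c * 10 // max_count)
--         return [f"{w}: {bar}" for w, k in pairs if k == c] + emit(c - 1)
--
--     return emit(max_count)
-- ===== Notes on version B (the rewrite author's own statement) =====
-- stated objective: alternative
-- what changed: Drops the redundant per-token strip (str.split() tokens are already stripped), replaces Counter/most_common by an order-preserving dedup plus per-word list.count, and emits lines by recursing over bar counts c = max_count..1 instead of sorting.
import Mathlib
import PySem

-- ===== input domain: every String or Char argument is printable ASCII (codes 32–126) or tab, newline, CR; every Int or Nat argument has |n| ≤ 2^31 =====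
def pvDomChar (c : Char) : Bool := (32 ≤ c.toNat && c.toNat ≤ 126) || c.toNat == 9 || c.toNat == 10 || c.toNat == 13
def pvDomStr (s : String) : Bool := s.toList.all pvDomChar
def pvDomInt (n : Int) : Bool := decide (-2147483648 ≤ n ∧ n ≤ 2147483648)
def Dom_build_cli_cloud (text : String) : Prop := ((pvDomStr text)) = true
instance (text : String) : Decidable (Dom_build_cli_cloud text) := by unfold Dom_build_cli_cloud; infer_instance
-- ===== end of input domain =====

-- B drops the redundant strip, counts by order-preserving dedup + list.count, and emits by
-- recursion over bar counts instead of sorting (objective 'alternative', no speed claim).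

-- ===== PORT A =====
-- Counter(words).most_common() is, by CPython's definition, sorted(items, key=count, reverse=True)
-- (stable, descending); ported as PySem.List.sorted … true.  counts[word] is ported as getD (word is
-- always a key).  "#" * n is ported as String.ofList (List.replicate n.toNat '#'), exact since n ≥ 1 here.
def build_cli_cloud (text : String) : List String :=
  let words := (PySem.Str.split₀ text).filterMap (fun word =>
    if PySem.Str.strip word = "" then none else some (PySem.Str.strip word))
  if words = [] then
    []
  else
    let counts := PySem.Dict.counter words
    match PySem.List.max? counts.values (fun v => v) with
    | none => []  -- unreachable: words ≠ [] so values ≠ [] (totality guard for Python's max())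
    | some max_count =>
      (PySem.List.sorted counts.items (fun p => p.2) true).map
        (fun p => p.1 ++ ": " ++
          String.ofList (List.replicate (max 1 (PySem.Int.floordiv (counts.getD p.1 0 * 10) max_count)).toNat '#'))

-- ===== PORT B =====
-- Source B's inner 'def emit(c)' recurses from max_count down to 0; ported as structural recursion on
-- the Nat value of c (emit is only called with 0 ≤ c ≤ max_count).  Same hand port of "#" * n.
def pvEmit (pairs : List (String × Int)) (max_count : Int) : Nat → List String
  | 0 => []
  | Nat.succ c' =>
      let bar := String.ofList
        (List.replicate (max 1 (PySem.Int.floordiv (((c' + 1 : Nat) : Int) * 10) max_count)).toNat '#')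
      ((pairs.filter (fun p => p.2 == ((c' + 1 : Nat) : Int))).map (fun p => p.1 ++ ": " ++ bar))
        ++ pvEmit pairs max_count c'

-- Source B: words = text.split(); dict.fromkeys dedup (first-encounter order) = PySem.Set.ofList;
-- per-word counts via list.count; then emit.
def build_cli_cloud_alt (text : String) : List String :=
  let words := PySem.Str.split₀ text
  if words = [] then
    []
  else
    let distinct := PySem.Set.ofList words
    let pairs := distinct.map (fun w => (w, (words.count w : Int)))
    match PySem.List.max? (pairs.map (fun p => p.2)) (fun v => v) with
    | none => []  -- unreachable: pairs ≠ [] (totality guard for Python's max())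
    | some max_count => pvEmit pairs max_count max_count.toNat

-- ===== PRECONDITION & SPEC =====
def Spec_build_cli_cloud (text : String) (out : List String) : Prop := out = build_cli_cloud_alt text
instance (text : String) (out : List String) : Decidable (Spec_build_cli_cloud text out) := by unfold Spec_build_cli_cloud; infer_instance

-- ===== CLAIM (what is proved, stated in full; the proofs are below) =====
def Claim_equal_build_cli_cloud : Prop := ∀ (text : String), Dom_build_cli_cloud text → Spec_build_cli_cloud text (build_cli_cloud text)

-- ===== LEMMAS AND PROOFS =====

-- tokens of s.split() are nonempty and whitespace-free
theorem pv_split₀_go_tokens (s : List Char) : ∀ (cur : List Char) (acc : List (List Char)),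
    (∀ c ∈ cur, PySem.Chars.isspace c = false) →
    (∀ t ∈ acc, t ≠ [] ∧ ∀ c ∈ t, PySem.Chars.isspace c = false) →
    ∀ t ∈ PySem.Chars.split₀.go s cur acc, t ≠ [] ∧ ∀ c ∈ t, PySem.Chars.isspace c = false := by
  induction s with
  | nil =>
      intro cur acc hcur hacc t ht
      unfold PySem.Chars.split₀.go at ht
      by_cases hc : cur.isEmpty = true
      · simp only [hc, if_true] at ht
        exact hacc t (List.mem_reverse.mp ht)
      · simp only [hc] at ht
        rcases List.mem_cons.mp (List.mem_reverse.mp ht) with h | h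
        · subst h
          constructor
          · simp [List.isEmpty_iff] at hc ⊢; exact hc
          · intro c hcm; exact hcur c (List.mem_reverse.mp hcm)
        · exact hacc t h
  | cons c rest ih =>
      intro cur acc hcur hacc t ht
      unfold PySem.Chars.split₀.go at ht
      by_cases hs : PySem.Chars.isspace c = true
      · simp only [hs, if_true] at ht
        by_cases hc : cur.isEmpty = true
        · simp only [hc, if_true] at ht
          exact ih [] acc (by simp) hacc t ht
        · simp only [hc] at ht
          refine ih [] (cur.reverse :: acc) (by simp) ?_ t ht
          intro u hu
          rcases List.mem_cons.mp hu with h | h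
          · subst h
            constructor
            · simp [List.isEmpty_iff] at hc ⊢; exact hc
            · intro d hd; exact hcur d (List.mem_reverse.mp hd)
          · exact hacc u h
      · simp only [hs] at ht
        refine ih (c :: cur) acc ?_ hacc t ht
        intro d hd
        rcases List.mem_cons.mp hd with h | h
        · subst h; simpa using hs
        · exact hcur d h

theorem pv_split₀_tokens (s : List Char) :
    ∀ t ∈ PySem.Chars.split₀ s, t ≠ [] ∧ ∀ c ∈ t, PySem.Chars.isspace c = false := by
  unfold PySem.Chars.split₀
  exact pv_split₀_go_tokens s [] [] (by simp) (by simp)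

theorem pv_strip_of_no_space (t : List Char)
    (h : ∀ c ∈ t, PySem.Chars.isspace c = false) : PySem.Chars.strip t = t := by
  unfold PySem.Chars.strip PySem.Chars.lstrip PySem.Chars.rstrip
  have hdrop : ∀ (u : List Char), (∀ c ∈ u, PySem.Chars.isspace c = false) →
      u.dropWhile PySem.Chars.isspace = u := by
    intro u hu
    apply List.dropWhile_eq_self_iff.mpr
    intro hl
    simp [hu _ (List.getElem_mem hl)]
  rw [hdrop t h, hdrop t.reverse (fun c hc => h c (List.mem_reverse.mp hc)), List.reverse_reverse]

-- A's '[w.strip() for w in text.split() if w.strip()]' is text.split() itself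
theorem pv_words_eq (text : String) :
    (PySem.Str.split₀ text).filterMap (fun word =>
      if PySem.Str.strip word = "" then none else some (PySem.Str.strip word))
      = PySem.Str.split₀ text := by
  unfold PySem.Str.split₀
  rw [List.filterMap_map]
  have hgen : ∀ {α β : Type} (L : List α) (g : α → Option β) (h : α → β),
      (∀ x ∈ L, g x = some (h x)) → L.filterMap g = L.map h := by
    intro α β L g h hL
    induction L with
    | nil => rfl
    | cons x xs ih =>
        rw [List.map_cons, List.filterMap_cons, hL x (by simp)]
        rw [ih (fun u hu => hL u (by simp [hu]))]
  apply hgen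
  intro t ht
  obtain ⟨hne, hns⟩ := pv_split₀_tokens text.toList t ht
  have hstrip : PySem.Str.strip (String.ofList t) = String.ofList t := by
    unfold PySem.Str.strip
    rw [String.toList_ofList, pv_strip_of_no_space t hns]
  simp only [Function.comp, hstrip]
  rw [if_neg]
  intro hcon
  exact hne (by simpa using congrArg String.toList hcon)

-- insertBy skips a prefix it does not go before
theorem pv_insertBy_append_not {α : Type} (before : α → α → Bool) (x : α) (L1 L2 : List α)
    (h : ∀ y ∈ L1, before x y = false) :
    PySem.List.insertBy before x (L1 ++ L2) = L1 ++ PySem.List.insertBy before x L2 := by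
  induction L1 with
  | nil => simp
  | cons y t ih =>
      simp only [List.cons_append, PySem.List.insertBy, h y (by simp)]
      simp [ih (fun z hz => h z (by simp [hz]))]

theorem pv_insertBy_front {α : Type} (before : α → α → Bool) (x : α) (L : List α)
    (h : ∀ y ∈ L, before x y = true) :
    PySem.List.insertBy before x L = x :: L := by
  cases L with
  | nil => rfl
  | cons y t => simp [PySem.List.insertBy, h y (by simp)]

theorem pv_flatMap_congr_mem {α β : Type} (R : List α) (f g : α → List β)
    (h : ∀ c ∈ R, f c = g c) : R.flatMap f = R.flatMap g := by
  induction R with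
  | nil => rfl
  | cons c t ih =>
      simp only [List.flatMap_cons, h c (by simp)]
      rw [ih (fun z hz => h z (by simp [hz]))]

-- inserting x (stably, descending) into a bucket decomposition appends x to its bucket
theorem pv_insertBy_flatMap_filter {α : Type} (key : α → Int) (x : α) (R : List Int) (xs : List α)
    (hR : R.Pairwise (· > ·)) (hx : key x ∈ R) :
    PySem.List.insertBy (fun a b => decide (key b < key a)) x
        (R.flatMap (fun c => xs.filter (fun y => key y == c)))
      = R.flatMap (fun c => (xs ++ [x]).filter (fun y => key y == c)) := by
  induction R with
  | nil => cases hx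
  | cons c R' ih =>
      have hhead : ∀ c' ∈ R', c' < c := by
        intro c' hc'
        exact (List.pairwise_cons.mp hR).1 c' hc'
      have hR' : R'.Pairwise (· > ·) := (List.pairwise_cons.mp hR).2
      have hmemrest : ∀ z ∈ R'.flatMap (fun c => xs.filter (fun y => key y == c)), key z ∈ R' := by
        intro z hz
        rcases List.mem_flatMap.mp hz with ⟨c', hc', hzf⟩
        have hkz : key z = c' := by simpa [beq_iff_eq] using (List.mem_filter.mp hzf).2
        rw [hkz]; exact hc'
      by_cases hc : key x = c
      · -- x lands at the end of bucket c
        rw [List.flatMap_cons, List.flatMap_cons]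
        rw [pv_insertBy_append_not]
        · rw [pv_insertBy_front]
          · have hbucket : (xs ++ [x]).filter (fun y => key y == c)
                = xs.filter (fun y => key y == c) ++ [x] := by
              simp [List.filter_append, hc]
            rw [hbucket]
            have hrest : R'.flatMap (fun c' => (xs ++ [x]).filter (fun y => key y == c'))
                = R'.flatMap (fun c' => xs.filter (fun y => key y == c')) := by
              apply pv_flatMap_congr_mem
              intro c' hc'
              have : key x ≠ c' := by
                have := hhead c' hc'; omega
              simp [List.filter_append, this]
            rw [hrest]
            simp
          · intro z hz
            have hzm := hmemrest z hz
            have : key z < key x := by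
              have := hhead _ hzm; omega
            simpa using this
        · intro y hy
          have : key y = c := by
            have := (List.mem_filter.mp hy).2; simpa [beq_iff_eq] using this
          simp [this, hc]
      · -- x belongs to a later bucket
        have hx' : key x ∈ R' := by
          rcases hx with _ | h
          · exact absurd rfl hc
          · assumption
        rw [List.flatMap_cons, List.flatMap_cons]
        rw [pv_insertBy_append_not]
        · rw [ih hR' hx']
          have : (xs ++ [x]).filter (fun y => key y == c) = xs.filter (fun y => key y == c) := by
            simp [List.filter_append, hc]
          rw [this]
        · intro y hy
          have hyc : key y = c := by
            have := (List.mem_filter.mp hy).2; simpa [beq_iff_eq] using this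
          have : key x < c := hhead _ hx'
          simp [hyc]; omega

-- Python's stable descending sort by an Int key in (0, m] is the bucket concatenation m, m-1, …, 1
theorem pv_sorted_rev_buckets {α : Type} (key : α → Int) (xs : List α) (m : Int)
    (h : ∀ x ∈ xs, 0 < key x ∧ key x ≤ m) :
    PySem.List.sorted xs key true
      = (PySem.List.pyRange m 0 (-1)).flatMap (fun c => xs.filter (fun y => key y == c)) := by
  rw [PySem.List.sorted_rev_eq_foldl_insertBy]
  have hpair : (PySem.List.pyRange m 0 (-1)).Pairwise (· > ·) := by
    rw [PySem.List.pyRange_neg_one_eq_reverse]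
    rw [List.pairwise_reverse]
    simp only [gt_iff_lt]
    exact PySem.List.pairwise_lt_pyRange_one _ _
  induction xs using List.reverseRecOn with
  | nil =>
      rw [show ((List.nil : List α).foldl
        (fun acc x => PySem.List.insertBy (fun a b => decide (key b < key a)) x acc) [] = []) from rfl]
      rw [pv_flatMap_congr_mem _ _ (fun _ => ([] : List α)) (fun c _ => by simp)]
      simp
  | append_singleton ys x ih =>
      rw [List.foldl_append, List.foldl_cons, List.foldl_nil]
      rw [ih (fun z hz => h z (by simp [hz]))]
      apply pv_insertBy_flatMap_filter
      · exact hpair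
      · have := h x (by simp)
        rw [PySem.List.mem_pyRange_neg_one]
        omega

-- pyRange m 0 (-1) peels its head
theorem pv_pyRange_neg_one_succ (n : Nat) :
    PySem.List.pyRange ((n + 1 : Nat) : Int) 0 (-1)
      = ((n + 1 : Nat) : Int) :: PySem.List.pyRange (n : Int) 0 (-1) := by
  rw [PySem.List.pyRange_neg_one_eq_reverse, PySem.List.pyRange_neg_one_eq_reverse]
  rw [show ((0 : Int) + 1) = 1 from rfl]
  rw [PySem.List.pyRange_one_append 1 ((n + 1 : Nat) : Int) (((n + 1 : Nat) : Int) + 1)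
    (by push_cast; omega) (by omega)]
  rw [PySem.List.pyRange_one_cons (a := ((n + 1 : Nat) : Int)) (by omega)]
  have : PySem.List.pyRange (((n + 1 : Nat) : Int) + 1) (((n + 1 : Nat) : Int) + 1) = [] := by
    have := PySem.List.pairwise_lt_pyRange_one (((n + 1 : Nat) : Int) + 1) (((n + 1 : Nat) : Int) + 1)
    cases hE : PySem.List.pyRange (((n + 1 : Nat) : Int) + 1) (((n + 1 : Nat) : Int) + 1) with
    | nil => rfl
    | cons a t =>
        have ha : a ∈ PySem.List.pyRange (((n + 1 : Nat) : Int) + 1) (((n + 1 : Nat) : Int) + 1) := by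
          rw [hE]; simp
        have := PySem.List.mem_pyRange_one.mp ha
        omega
  rw [this]
  have hcast : ((n + 1 : Nat) : Int) = (n : Int) + 1 := by push_cast; ring
  simp [hcast]

-- B's emit m.toNat is the bucket flatMap over pyRange m 0 (-1), with the line map pushed inside
theorem pv_emit_eq_flatMap (pairs : List (String × Int)) (m : Int) (n : Nat) :
    pvEmit pairs m n
      = (PySem.List.pyRange (n : Int) 0 (-1)).flatMap (fun c =>
          (pairs.filter (fun p => p.2 == c)).map (fun p => p.1 ++ ": " ++
            String.ofList (List.replicate (max 1 (PySem.Int.floordiv (c * 10) m)).toNat '#'))) := by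
  induction n with
  | zero =>
      have : PySem.List.pyRange (0 : Int) 0 (-1) = [] := by decide
      simp [pvEmit, this]
  | succ n ih =>
      rw [show ((n + 1 : Nat) : Int) = (((n + 1 : Nat) : Int)) from rfl]
      rw [pv_pyRange_neg_one_succ n, List.flatMap_cons]
      simp only [pvEmit, ih]

theorem build_cli_cloud_eq_alt (text : String) :
    build_cli_cloud text = build_cli_cloud_alt text := by
  unfold build_cli_cloud build_cli_cloud_alt
  rw [pv_words_eq]
  set words := PySem.Str.split₀ text with hwords
  by_cases hw : words = []
  · simp [hw]
  · simp only [hw, if_false]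
    set counts := PySem.Dict.counter words with hcounts
    set pairs := (PySem.Set.ofList words).map (fun w => (w, ((words.count w : Int)))) with hpairs
    have hitems : counts.items = pairs := by
      rw [hcounts, hpairs]; exact PySem.Dict.items_counter words
    have hvalues : counts.values = pairs.map (fun p => p.2) := by
      rw [show counts.values = counts.items.map (·.2) from rfl, hitems]
    rw [hvalues]
    cases hmax : PySem.List.max? (pairs.map (fun p => p.2)) (fun v => v) with
    | none => rfl
    | some m =>
        dsimp only
        have hbound : ∀ p ∈ pairs, 0 < p.2 ∧ p.2 ≤ m := by
          intro p hp
          rw [hpairs] at hp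
          rcases List.mem_map.mp hp with ⟨k, hk, rfl⟩
          constructor
          · have hkw : k ∈ words := (PySem.Set.mem_ofList _ _).mp hk
            show (0 : Int) < ((words.count k : Int))
            exact_mod_cast List.count_pos_iff.mpr hkw
          · apply PySem.List.max?_isMax hmax
            rw [hpairs]
            exact List.mem_map.mpr ⟨(k, ((words.count k : Int))), List.mem_map.mpr ⟨k, hk, rfl⟩, rfl⟩
        have hgetD : ∀ p ∈ pairs, counts.getD p.1 0 = p.2 := by
          intro p hp
          rw [hpairs] at hp
          rcases List.mem_map.mp hp with ⟨k, hk, rfl⟩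
          exact PySem.Dict.getD_counter words k
        have hm1 : 1 ≤ m := by
          have hne : pairs ≠ [] := by
            rw [hpairs]
            intro hcon
            have : PySem.Set.ofList words = [] := by
              cases hE : PySem.Set.ofList words with
              | nil => rfl
              | cons a t => rw [hE] at hcon; simp at hcon
            cases hWn : words with
            | nil => exact hw hWn
            | cons a t =>
                have : a ∈ PySem.Set.ofList words := (PySem.Set.mem_ofList _ _).mpr (by rw [hWn]; simp)
                rw [‹PySem.Set.ofList words = []›] at this
                simp at this
          cases hP : pairs with
          | nil => exact absurd hP hne
          | cons p t =>
              have hpmem : p ∈ pairs := by rw [hP]; simp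
              have := (hbound p hpmem).1
              have := PySem.List.max?_isMax hmax p.2 (List.mem_map.mpr ⟨p, hpmem, rfl⟩)
              omega
        have hmn : m = ((m.toNat : Nat) : Int) := by omega
        rw [pv_emit_eq_flatMap pairs m m.toNat, ← hmn]
        -- A: sorted = bucket flatMap, then push the map inside
        rw [hitems, pv_sorted_rev_buckets (fun p => p.2) pairs m hbound]
        rw [List.map_flatMap]
        apply pv_flatMap_congr_mem
        intro c _
        apply List.map_congr_left
        intro p hp
        have hpi : p ∈ pairs := (List.mem_filter.mp hp).1
        have hpc : p.2 = c := by simpa [beq_iff_eq] using (List.mem_filter.mp hp).2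
        rw [hgetD p hpi, hpc]

-- ===== VERDICT (by name: the statement is the Claim_ definition above) =====
theorem build_cli_cloud_spec : Claim_equal_build_cli_cloud := by
  intro text _
  unfold Spec_build_cli_cloud
  exact build_cli_cloud_eq_alt text
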